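-- pv_equiv track=rewrite | github.com/eoe-git/baseball_forecaster | forecaster/batting_queries.py | insert_standard_batting_career_stats_by_age
-- ===== SOURCE A (Python) =====
-- def insert_standard_batting_career_stats_by_age(stat_categories):
--     min_age = 16
--     max_age = 50
--     query = """
--             INSERT INTO
--                 standard_batting_career_by_age
--             VALUES
--                 (?, ?, ?
--             """
--     for i in range(min_age, max_age + 1):
--         for j in range(0, len(stat_categories)):
--             query += ', ?'
--     query += ')'
--     return query
-- ===== SOURCE B (Python) =====
-- def insert_standard_batting_career_stats_by_age(stat_categories):
--     base = """
--             INSERT INTO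
--                 standard_batting_career_by_age
--             VALUES
--                 (?, ?, ?
--             """
--     return base + ', ?' * (35 * len(stat_categories)) + ')'
-- ===== Notes on version B (the rewrite author's own statement) =====
-- stated objective: simpler
-- what changed: Replaced the nested 35 x len(stat_categories) loop of repeated string appends by computing the placeholder count arithmetically (35 * len, the age span collapsed to a constant) and building the whole tail with one string multiplication.
import Mathlib
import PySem

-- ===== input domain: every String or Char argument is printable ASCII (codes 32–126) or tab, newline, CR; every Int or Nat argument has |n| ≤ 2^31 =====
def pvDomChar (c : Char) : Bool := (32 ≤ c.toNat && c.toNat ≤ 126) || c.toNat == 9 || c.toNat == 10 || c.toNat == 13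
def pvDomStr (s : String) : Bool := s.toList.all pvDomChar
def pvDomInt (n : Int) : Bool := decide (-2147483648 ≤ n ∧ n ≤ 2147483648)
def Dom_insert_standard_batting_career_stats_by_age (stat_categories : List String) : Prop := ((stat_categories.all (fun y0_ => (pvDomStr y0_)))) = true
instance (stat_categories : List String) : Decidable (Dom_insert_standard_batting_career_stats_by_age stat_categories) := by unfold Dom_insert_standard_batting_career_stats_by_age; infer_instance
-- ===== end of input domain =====

-- B replaces A's nested append loops by the arithmetic placeholder count 35 * len(stat_categories) and one string repetition (simpler; same cost class).

-- ===== PORT A =====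
def insert_standard_batting_career_stats_by_age (stat_categories : List String) : String :=
  let query := "\n            INSERT INTO\n                standard_batting_career_by_age\n            VALUES\n                (?, ?, ?\n            "
  let query := (PySem.List.pyRange 16 (50 + 1) 1).foldl
    (fun q _ => (PySem.List.pyRange 0 (stat_categories.length : Int) 1).foldl
      (fun q' _ => q' ++ ", ?") q) query
  query ++ ")"

-- ===== PORT B =====
-- pyStrMul s n = Python's s * n (exact for n ≥ 0, the only case B uses)
def pyStrMul (s : String) : Nat → String
  | 0 => ""
  | n + 1 => pyStrMul s n ++ s

def insert_standard_batting_career_stats_by_age_alt (stat_categories : List String) : String :=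
  "\n            INSERT INTO\n                standard_batting_career_by_age\n            VALUES\n                (?, ?, ?\n            "
    ++ pyStrMul ", ?" (35 * stat_categories.length) ++ ")"

-- ===== PRECONDITION & SPEC =====
def Spec_insert_standard_batting_career_stats_by_age (stat_categories : List String) (out : String) : Prop := out = insert_standard_batting_career_stats_by_age_alt stat_categories
instance (stat_categories : List String) (out : String) : Decidable (Spec_insert_standard_batting_career_stats_by_age stat_categories out) := by unfold Spec_insert_standard_batting_career_stats_by_age; infer_instance

-- ===== CLAIM (what is proved, stated in full; the proofs are below) =====
def Claim_equal_insert_standard_batting_career_stats_by_age : Prop := ∀ (stat_categories : List String), Dom_insert_standard_batting_career_stats_by_age stat_categories → Spec_insert_standard_batting_career_stats_by_age stat_categories (insert_standard_batting_career_stats_by_age stat_categories)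

-- ===== LEMMAS AND PROOFS =====

theorem pyStrMul_add (s : String) (m n : Nat) :
    pyStrMul s (m + n) = pyStrMul s m ++ pyStrMul s n := by
  induction n with
  | zero => simp [pyStrMul]
  | succ k ih => rw [← Nat.add_assoc, pyStrMul, pyStrMul, ih, String.append_assoc]

theorem foldl_append_const {α : Type} (c : String) (l : List α) (q : String) :
    l.foldl (fun q' _ => q' ++ c) q = q ++ pyStrMul c l.length := by
  induction l generalizing q with
  | nil => simp [pyStrMul]
  | cons x xs ih =>
    rw [List.foldl_cons, ih, List.length_cons, Nat.add_comm, pyStrMul_add]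
    simp [pyStrMul, String.append_assoc]

theorem foldl_foldl_append_const {α β : Type} (c : String) (L : List α) (M : List β) (q : String) :
    L.foldl (fun q' _ => M.foldl (fun q'' _ => q'' ++ c) q') q
      = q ++ pyStrMul c (L.length * M.length) := by
  induction L generalizing q with
  | nil => simp [pyStrMul]
  | cons x xs ih =>
    rw [List.foldl_cons, foldl_append_const, ih, List.length_cons,
      Nat.succ_mul, Nat.add_comm, pyStrMul_add, String.append_assoc]

-- ===== VERDICT (by name: the statement is the Claim_ definition above) =====
theorem insert_standard_batting_career_stats_by_age_spec : Claim_equal_insert_standard_batting_career_stats_by_age := by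
  intro stat_categories _
  unfold Spec_insert_standard_batting_career_stats_by_age
  unfold insert_standard_batting_career_stats_by_age insert_standard_batting_career_stats_by_age_alt
  simp only [foldl_foldl_append_const, PySem.List.length_pyRange_one]
  norm_num
  congr 1
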